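-- pv_equiv track=rewrite | github.com/iwaine/paris-live-2 | football-live-prediction/scrapers/recent_form_complete.py | _map_to_intervals
-- ===== SOURCE A (Python) =====
-- from typing import List, Dict, Optional
--
-- def _map_to_intervals(minutes: List[int]) -> Dict:
--     intervals = {
--         '0-15': 0, '16-30': 0, '31-45': 0,
--         '46-60': 0, '61-75': 0, '76-90': 0
--     }
--
--     for minute in minutes:
--         if 0 <= minute <= 15:
--             intervals['0-15'] += 1
--         elif 16 <= minute <= 30:
--             intervals['16-30'] += 1
--         elif 31 <= minute <= 45:
--             intervals['31-45'] += 1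
--         elif 46 <= minute <= 60:
--             intervals['46-60'] += 1
--         elif 61 <= minute <= 75:
--             intervals['61-75'] += 1
--         elif 76 <= minute <= 90:
--             intervals['76-90'] += 1
--
--     return intervals
-- ===== SOURCE B (Python) =====
-- def _map_to_intervals(minutes):
--     bounds = [(0, 15, '0-15'), (16, 30, '16-30'), (31, 45, '31-45'),
--               (46, 60, '46-60'), (61, 75, '61-75'), (76, 90, '76-90')]
--     return {key: sum(1 for m in minutes if lo <= m <= hi) for lo, hi, key in bounds}
-- ===== Notes on version B (the rewrite author's own statement) =====
-- stated objective: alternative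
-- what changed: Replaces the single pass with an if/elif cascade over a mutable dict by a table of (low, high, key) interval triples, building the result with one range-filtered count per interval.
import Mathlib
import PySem

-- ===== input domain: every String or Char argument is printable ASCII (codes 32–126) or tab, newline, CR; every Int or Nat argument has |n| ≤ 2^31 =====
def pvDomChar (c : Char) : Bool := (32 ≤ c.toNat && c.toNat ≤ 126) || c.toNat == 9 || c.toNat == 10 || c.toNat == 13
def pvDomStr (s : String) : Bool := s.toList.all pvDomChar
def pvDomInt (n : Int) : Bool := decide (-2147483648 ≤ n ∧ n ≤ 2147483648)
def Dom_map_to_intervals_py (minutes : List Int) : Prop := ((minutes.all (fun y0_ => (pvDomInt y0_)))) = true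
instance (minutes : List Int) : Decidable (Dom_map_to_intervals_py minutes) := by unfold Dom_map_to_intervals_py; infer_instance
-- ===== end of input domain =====

-- B replaces A's single-pass if/elif cascade over a mutable dict by a table of
-- (low, high, key) interval triples, one range-filtered count per interval (alternative decomposition).


-- ===== PORT A =====
-- the loop body of A's for-loop (if/elif cascade updating the dict)
def stepA (d : PySem.Dict String Int) (minute : Int) : PySem.Dict String Int :=
  if 0 ≤ minute ∧ minute ≤ 15 then d.modify "0-15" 0 (· + 1)
  else if 16 ≤ minute ∧ minute ≤ 30 then d.modify "16-30" 0 (· + 1)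
  else if 31 ≤ minute ∧ minute ≤ 45 then d.modify "31-45" 0 (· + 1)
  else if 46 ≤ minute ∧ minute ≤ 60 then d.modify "46-60" 0 (· + 1)
  else if 61 ≤ minute ∧ minute ≤ 75 then d.modify "61-75" 0 (· + 1)
  else if 76 ≤ minute ∧ minute ≤ 90 then d.modify "76-90" 0 (· + 1)
  else d

def map_to_intervals_py (minutes : List Int) : List (String × Int) :=
  let intervals : PySem.Dict String Int :=
    PySem.Dict.ofList [("0-15", 0), ("16-30", 0), ("31-45", 0),
                       ("46-60", 0), ("61-75", 0), ("76-90", 0)]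
  (minutes.foldl stepA intervals).items

-- ===== PORT B =====
def map_to_intervals_py_alt (minutes : List Int) : List (String × Int) :=
  let bounds : List (Int × Int × String) :=
    [(0, 15, "0-15"), (16, 30, "16-30"), (31, 45, "31-45"),
     (46, 60, "46-60"), (61, 75, "61-75"), (76, 90, "76-90")]
  bounds.map (fun b => (b.2.2, (minutes.countP (fun m => b.1 ≤ m ∧ m ≤ b.2.1) : Int)))

-- ===== PRECONDITION & SPEC =====
def Spec_map_to_intervals_py (minutes : List Int) (out : List (String × Int)) : Prop := out = map_to_intervals_py_alt minutes
instance (minutes : List Int) (out : List (String × Int)) : Decidable (Spec_map_to_intervals_py minutes out) := by unfold Spec_map_to_intervals_py; infer_instance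

-- ===== CLAIM (what is proved, stated in full; the proofs are below) =====
def Claim_equal_map_to_intervals_py : Prop := ∀ (minutes : List Int), Dom_map_to_intervals_py minutes → Spec_map_to_intervals_py minutes (map_to_intervals_py minutes)

-- ===== LEMMAS AND PROOFS =====

-- invariant of A's loop: from the six-key literal dict with counts a..f, the fold
-- adds to each entry the number of minutes falling in its interval
lemma foldl_intervals (l : List Int) (a b c d e f : Int) :
    (l.foldl stepA
      (PySem.Dict.mk [("0-15", a), ("16-30", b), ("31-45", c),
                      ("46-60", d), ("61-75", e), ("76-90", f)])) =
    PySem.Dict.mk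
      [("0-15", a + (l.countP (fun m => 0 ≤ m ∧ m ≤ 15) : Int)),
       ("16-30", b + (l.countP (fun m => 16 ≤ m ∧ m ≤ 30) : Int)),
       ("31-45", c + (l.countP (fun m => 31 ≤ m ∧ m ≤ 45) : Int)),
       ("46-60", d + (l.countP (fun m => 46 ≤ m ∧ m ≤ 60) : Int)),
       ("61-75", e + (l.countP (fun m => 61 ≤ m ∧ m ≤ 75) : Int)),
       ("76-90", f + (l.countP (fun m => 76 ≤ m ∧ m ≤ 90) : Int))] := by
  induction l generalizing a b c d e f with
  | nil => simp only [List.foldl_nil, List.countP_nil, Nat.cast_zero, add_zero]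
  | cons m t ih =>
    rw [List.foldl_cons, stepA]
    split_ifs with h1 h2 h3 h4 h5 h6
    · rw [show (PySem.Dict.mk [("0-15", a), ("16-30", b), ("31-45", c), ("46-60", d), ("61-75", e), ("76-90", f)]).modify "0-15" 0 (· + 1) = PySem.Dict.mk [("0-15", a + 1), ("16-30", b), ("31-45", c), ("46-60", d), ("61-75", e), ("76-90", f)] from by
        simp [PySem.Dict.modify, PySem.Dict.insert, PySem.Dict.getD, PySem.Dict.get?, PySem.Dict.contains]]
      rw [ih]
      have b1 : decide (0 ≤ m ∧ m ≤ 15) = true := decide_eq_true h1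
      have b2 : decide (16 ≤ m ∧ m ≤ 30) = false := decide_eq_false (by omega)
      have b3 : decide (31 ≤ m ∧ m ≤ 45) = false := decide_eq_false (by omega)
      have b4 : decide (46 ≤ m ∧ m ≤ 60) = false := decide_eq_false (by omega)
      have b5 : decide (61 ≤ m ∧ m ≤ 75) = false := decide_eq_false (by omega)
      have b6 : decide (76 ≤ m ∧ m ≤ 90) = false := decide_eq_false (by omega)
      simp only [List.countP_cons, b1, b2, b3, b4, b5, b6, if_true, if_false,
        Bool.false_eq_true, Nat.cast_add, Nat.cast_one, Nat.cast_zero, add_zero]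
      ring_nf
    · rw [show (PySem.Dict.mk [("0-15", a), ("16-30", b), ("31-45", c), ("46-60", d), ("61-75", e), ("76-90", f)]).modify "16-30" 0 (· + 1) = PySem.Dict.mk [("0-15", a), ("16-30", b + 1), ("31-45", c), ("46-60", d), ("61-75", e), ("76-90", f)] from by
        simp [PySem.Dict.modify, PySem.Dict.insert, PySem.Dict.getD, PySem.Dict.get?, PySem.Dict.contains]]
      rw [ih]
      have b1 : decide (0 ≤ m ∧ m ≤ 15) = false := decide_eq_false h1
      have b2 : decide (16 ≤ m ∧ m ≤ 30) = true := decide_eq_true h2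
      have b3 : decide (31 ≤ m ∧ m ≤ 45) = false := decide_eq_false (by omega)
      have b4 : decide (46 ≤ m ∧ m ≤ 60) = false := decide_eq_false (by omega)
      have b5 : decide (61 ≤ m ∧ m ≤ 75) = false := decide_eq_false (by omega)
      have b6 : decide (76 ≤ m ∧ m ≤ 90) = false := decide_eq_false (by omega)
      simp only [List.countP_cons, b1, b2, b3, b4, b5, b6, if_true, if_false,
        Bool.false_eq_true, Nat.cast_add, Nat.cast_one, Nat.cast_zero, add_zero]
      ring_nf
    · rw [show (PySem.Dict.mk [("0-15", a), ("16-30", b), ("31-45", c), ("46-60", d), ("61-75", e), ("76-90", f)]).modify "31-45" 0 (· + 1) = PySem.Dict.mk [("0-15", a), ("16-30", b), ("31-45", c + 1), ("46-60", d), ("61-75", e), ("76-90", f)] from by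
        simp [PySem.Dict.modify, PySem.Dict.insert, PySem.Dict.getD, PySem.Dict.get?, PySem.Dict.contains]]
      rw [ih]
      have b1 : decide (0 ≤ m ∧ m ≤ 15) = false := decide_eq_false h1
      have b2 : decide (16 ≤ m ∧ m ≤ 30) = false := decide_eq_false h2
      have b3 : decide (31 ≤ m ∧ m ≤ 45) = true := decide_eq_true h3
      have b4 : decide (46 ≤ m ∧ m ≤ 60) = false := decide_eq_false (by omega)
      have b5 : decide (61 ≤ m ∧ m ≤ 75) = false := decide_eq_false (by omega)
      have b6 : decide (76 ≤ m ∧ m ≤ 90) = false := decide_eq_false (by omega)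
      simp only [List.countP_cons, b1, b2, b3, b4, b5, b6, if_true, if_false,
        Bool.false_eq_true, Nat.cast_add, Nat.cast_one, Nat.cast_zero, add_zero]
      ring_nf
    · rw [show (PySem.Dict.mk [("0-15", a), ("16-30", b), ("31-45", c), ("46-60", d), ("61-75", e), ("76-90", f)]).modify "46-60" 0 (· + 1) = PySem.Dict.mk [("0-15", a), ("16-30", b), ("31-45", c), ("46-60", d + 1), ("61-75", e), ("76-90", f)] from by
        simp [PySem.Dict.modify, PySem.Dict.insert, PySem.Dict.getD, PySem.Dict.get?, PySem.Dict.contains]]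
      rw [ih]
      have b1 : decide (0 ≤ m ∧ m ≤ 15) = false := decide_eq_false h1
      have b2 : decide (16 ≤ m ∧ m ≤ 30) = false := decide_eq_false h2
      have b3 : decide (31 ≤ m ∧ m ≤ 45) = false := decide_eq_false h3
      have b4 : decide (46 ≤ m ∧ m ≤ 60) = true := decide_eq_true h4
      have b5 : decide (61 ≤ m ∧ m ≤ 75) = false := decide_eq_false (by omega)
      have b6 : decide (76 ≤ m ∧ m ≤ 90) = false := decide_eq_false (by omega)
      simp only [List.countP_cons, b1, b2, b3, b4, b5, b6, if_true, if_false,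
        Bool.false_eq_true, Nat.cast_add, Nat.cast_one, Nat.cast_zero, add_zero]
      ring_nf
    · rw [show (PySem.Dict.mk [("0-15", a), ("16-30", b), ("31-45", c), ("46-60", d), ("61-75", e), ("76-90", f)]).modify "61-75" 0 (· + 1) = PySem.Dict.mk [("0-15", a), ("16-30", b), ("31-45", c), ("46-60", d), ("61-75", e + 1), ("76-90", f)] from by
        simp [PySem.Dict.modify, PySem.Dict.insert, PySem.Dict.getD, PySem.Dict.get?, PySem.Dict.contains]]
      rw [ih]
      have b1 : decide (0 ≤ m ∧ m ≤ 15) = false := decide_eq_false h1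
      have b2 : decide (16 ≤ m ∧ m ≤ 30) = false := decide_eq_false h2
      have b3 : decide (31 ≤ m ∧ m ≤ 45) = false := decide_eq_false h3
      have b4 : decide (46 ≤ m ∧ m ≤ 60) = false := decide_eq_false h4
      have b5 : decide (61 ≤ m ∧ m ≤ 75) = true := decide_eq_true h5
      have b6 : decide (76 ≤ m ∧ m ≤ 90) = false := decide_eq_false (by omega)
      simp only [List.countP_cons, b1, b2, b3, b4, b5, b6, if_true, if_false,
        Bool.false_eq_true, Nat.cast_add, Nat.cast_one, Nat.cast_zero, add_zero]
      ring_nf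
    · rw [show (PySem.Dict.mk [("0-15", a), ("16-30", b), ("31-45", c), ("46-60", d), ("61-75", e), ("76-90", f)]).modify "76-90" 0 (· + 1) = PySem.Dict.mk [("0-15", a), ("16-30", b), ("31-45", c), ("46-60", d), ("61-75", e), ("76-90", f + 1)] from by
        simp [PySem.Dict.modify, PySem.Dict.insert, PySem.Dict.getD, PySem.Dict.get?, PySem.Dict.contains]]
      rw [ih]
      have b1 : decide (0 ≤ m ∧ m ≤ 15) = false := decide_eq_false h1
      have b2 : decide (16 ≤ m ∧ m ≤ 30) = false := decide_eq_false h2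
      have b3 : decide (31 ≤ m ∧ m ≤ 45) = false := decide_eq_false h3
      have b4 : decide (46 ≤ m ∧ m ≤ 60) = false := decide_eq_false h4
      have b5 : decide (61 ≤ m ∧ m ≤ 75) = false := decide_eq_false h5
      have b6 : decide (76 ≤ m ∧ m ≤ 90) = true := decide_eq_true h6
      simp only [List.countP_cons, b1, b2, b3, b4, b5, b6, if_true, if_false,
        Bool.false_eq_true, Nat.cast_add, Nat.cast_one, Nat.cast_zero, add_zero]
      ring_nf
    · rw [ih]
      have b1 : decide (0 ≤ m ∧ m ≤ 15) = false := decide_eq_false h1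
      have b2 : decide (16 ≤ m ∧ m ≤ 30) = false := decide_eq_false h2
      have b3 : decide (31 ≤ m ∧ m ≤ 45) = false := decide_eq_false h3
      have b4 : decide (46 ≤ m ∧ m ≤ 60) = false := decide_eq_false h4
      have b5 : decide (61 ≤ m ∧ m ≤ 75) = false := decide_eq_false h5
      have b6 : decide (76 ≤ m ∧ m ≤ 90) = false := decide_eq_false h6
      simp only [List.countP_cons, b1, b2, b3, b4, b5, b6, if_true, if_false,
        Bool.false_eq_true, Nat.cast_add, Nat.cast_one, Nat.cast_zero, add_zero]

-- ===== VERDICT (by name: the statement is the Claim_ definition above) =====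
theorem map_to_intervals_py_spec : Claim_equal_map_to_intervals_py := by
  intro minutes _
  unfold Spec_map_to_intervals_py
  rw [show map_to_intervals_py minutes =
        (minutes.foldl stepA (PySem.Dict.mk [("0-15", (0 : Int)), ("16-30", 0), ("31-45", 0),
          ("46-60", 0), ("61-75", 0), ("76-90", 0)])).items from rfl,
      foldl_intervals]
  simp [map_to_intervals_py_alt]
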